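-- pv_equiv track=rewrite | github.com/alyssa1996/CodingExercise | Algorithm/Greedy(탐욕법)/[코드업_3120] 리모컨.py | upTemp
-- ===== SOURCE A (Python) =====
-- def upTemp(current,goal):
--     result=0
--     while current!=goal:
--         if current+10>goal:
--             if current+5>goal:
--                 current+=1
--             else:
--                 current+=5
--         else:
--             current+=10
--         result+=1
--     return result
-- ===== SOURCE B (Python) =====
-- def upTemp(current, goal):
--     diff = goal - current
--     rem = diff % 10
--     return diff // 10 + (1 if rem >= 5 else 0) + rem % 5
-- ===== Notes on version B (the rewrite author's own statement) =====
-- stated objective: simpler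
-- what changed: replaces the step-by-step greedy loop (add 10/5/1 until reaching goal) with a three-term closed-form count diff//10 + (rem>=5) + rem%5 on diff = goal-current
import Mathlib
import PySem

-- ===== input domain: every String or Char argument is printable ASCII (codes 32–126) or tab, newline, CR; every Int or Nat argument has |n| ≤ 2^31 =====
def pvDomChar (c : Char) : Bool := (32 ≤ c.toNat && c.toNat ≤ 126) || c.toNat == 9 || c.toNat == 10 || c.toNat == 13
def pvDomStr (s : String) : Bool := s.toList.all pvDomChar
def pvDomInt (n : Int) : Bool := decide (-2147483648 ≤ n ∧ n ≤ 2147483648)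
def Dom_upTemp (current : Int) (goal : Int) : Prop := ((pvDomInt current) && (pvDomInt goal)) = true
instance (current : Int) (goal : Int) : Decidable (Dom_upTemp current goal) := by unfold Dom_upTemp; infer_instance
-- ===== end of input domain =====

-- B replaces A's step-by-step greedy loop with a closed-form arithmetic count (simpler); Pre_ excludes
-- current > goal, where A's loop moves away from goal and never terminates.


-- ===== PORT A =====
-- the while loop; the `goal < current` branch is a totality guard only (Python diverges
-- there; those inputs are outside Pre_upTemp)
def upTempGo (current : Int) (goal : Int) (result : Int) : Int :=
  if _h1 : current = goal then result
  else if _h2 : goal < current then result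
  else
    upTempGo
      (if current + 10 > goal then
         (if current + 5 > goal then current + 1 else current + 5)
       else current + 10)
      goal (result + 1)
termination_by (goal - current).toNat
decreasing_by split_ifs <;> omega

def upTemp (current : Int) (goal : Int) : Int := upTempGo current goal 0

-- ===== PORT B =====
def upTemp_alt (current : Int) (goal : Int) : Int :=
  let diff := goal - current
  let rem := PySem.Int.mod diff 10
  PySem.Int.floordiv diff 10 + (if rem ≥ 5 then 1 else 0) + PySem.Int.mod rem 5

-- ===== PRECONDITION & SPEC =====
-- Pre_ excludes current > goal: there A's loop increments current past goal forever (it never returns).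
def Pre_upTemp (current : Int) (goal : Int) : Prop := current ≤ goal
instance (current : Int) (goal : Int) : Decidable (Pre_upTemp current goal) := by unfold Pre_upTemp; infer_instance
def pvWitness_upTemp : Int × Int := (3, 47)

def Spec_upTemp (current : Int) (goal : Int) (out : Int) : Prop := out = upTemp_alt current goal
instance (current : Int) (goal : Int) (out : Int) : Decidable (Spec_upTemp current goal out) := by unfold Spec_upTemp; infer_instance

-- ===== CLAIM (what is proved, stated in full; the proofs are below) =====
def Claim_equal_upTemp : Prop := ∀ (current : Int) (goal : Int), Dom_upTemp current goal → Pre_upTemp current goal → Spec_upTemp current goal (upTemp current goal)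

-- ===== LEMMAS AND PROOFS =====

lemma alt_eq (c g : Int) :
    upTemp_alt c g = (g - c) / 10 + (if (g - c) % 10 ≥ 5 then 1 else 0) + ((g - c) % 10) % 5 := by
  simp only [upTemp_alt]
  rw [PySem.Int.floordiv_eq_ediv_of_pos (by norm_num : (0:Int) < 10),
      PySem.Int.mod_eq_emod_of_pos (by norm_num : (0:Int) < 10),
      PySem.Int.mod_eq_emod_of_pos (by norm_num : (0:Int) < 5)]

lemma upTempGo_eq (n : Nat) : ∀ (c g r : Int), (g - c).toNat = n → c ≤ g →
    upTempGo c g r = r + upTemp_alt c g := by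
  induction n using Nat.strong_induction_on with
  | _ n ih =>
    intro c g r hn hle
    rw [upTempGo]
    split_ifs with h1 h2 h3 h4
    · subst h1
      rw [alt_eq]
      split_ifs <;> omega
    · omega
    · have hlt : c < g := lt_of_le_of_ne hle h1
      rw [ih (g - (c + 1)).toNat (by omega) (c + 1) g (r + 1) rfl (by omega),
          alt_eq, alt_eq]
      split_ifs <;> omega
    · have hlt : c < g := lt_of_le_of_ne hle h1
      rw [ih (g - (c + 5)).toNat (by omega) (c + 5) g (r + 1) rfl (by omega),
          alt_eq, alt_eq]
      split_ifs <;> omega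
    · have hlt : c < g := lt_of_le_of_ne hle h1
      rw [ih (g - (c + 10)).toNat (by omega) (c + 10) g (r + 1) rfl (by omega),
          alt_eq, alt_eq]
      split_ifs <;> omega

-- ===== VERDICT (by name: the statement is the Claim_ definition above) =====
theorem upTemp_spec : Claim_equal_upTemp := by
  intro c g _ hpre
  unfold Spec_upTemp upTemp
  rw [upTempGo_eq (g - c).toNat c g 0 rfl hpre]
  omega
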